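-- pv_equiv track=rewrite | github.com/amcconville08/BrightDog-Cycling-Club | importer/import_timeseries.py | _compute_power_bests
-- ===== SOURCE A (Python) =====
-- from typing import Optional
--
-- _MMP_DURATIONS = {                      # durations for mean-maximal power
--     "best_5s":    5,
--     "best_30s":   30,
--     "best_1min":  60,
--     "best_5min":  300,
--     "best_10min": 600,
--     "best_20min": 1200,
--     "best_30min": 1800,
--     "best_60min": 3600,
-- }
--
-- def _build_1hz(records: list, field: str) -> list:
--     """
--     Resample a field from sparse records to a 1-Hz array.
--
--     Gaps are forward-filled (last-value-carried-forward), which is the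
--     standard approach for smart-recording FIT files. The first seconds
--     before any valid value remain None.
--     """
--     if not records:
--         return []
--     max_t = records[-1]["elapsed_s"]
--     arr = [None] * (max_t + 1)
--     for r in records:
--         v = r.get(field)
--         if v is not None:
--             arr[r["elapsed_s"]] = v
--
--     # Forward fill
--     last = None
--     filled = []
--     for v in arr:
--         if v is not None:
--             last = v
--         filled.append(last)
--     return filled
--
-- def _best_power_window(p_1hz: list, window_s: int) -> Optional[int]:
--     """
--     Best mean-maximal power over a sliding window of window_s seconds.
--     None values are treated as 0 (industry standard for MMP calculation).
--     Returns None if the activity is shorter than the window.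
--     """
--     n = len(p_1hz)
--     if n < window_s:
--         return None
--
--     # Replace None with 0
--     p = [v if v is not None else 0 for v in p_1hz]
--
--     w = sum(p[:window_s])
--     best = w
--
--     for i in range(window_s, n):
--         w += p[i] - p[i - window_s]
--         if w > best:
--             best = w
--
--     return int(round(best / window_s))
--
-- def _compute_power_bests(records: list) -> dict:
--     """Compute best MMP for all standard durations from the record stream."""
--     p_1hz = _build_1hz(records, "power")
--
--     # Only compute if there's meaningful power data
--     valid_count = sum(1 for v in p_1hz if v is not None and v > 0)
--     if valid_count < 10:
--         return {k: None for k in _MMP_DURATIONS}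
--
--     return {
--         col: _best_power_window(p_1hz, secs)
--         for col, secs in _MMP_DURATIONS.items()
--     }
-- ===== SOURCE B (Python) =====
-- # Alternative implementation: one shared prefix-sum table replaces the per-duration
-- # rolling-sum loop; each duration's best is the max of window differences of that table.
-- _MMP_DURATIONS = {
--     "best_5s":    5,
--     "best_30s":   30,
--     "best_1min":  60,
--     "best_5min":  300,
--     "best_10min": 600,
--     "best_20min": 1200,
--     "best_30min": 1800,
--     "best_60min": 3600,
-- }
--
--
-- def _filled_power_1hz(records):
--     """1 Hz power series, forward-filled (same resampling the importer uses)."""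
--     if not records:
--         return []
--     arr = [None] * (records[-1]["elapsed_s"] + 1)
--     for r in records:
--         v = r.get("power")
--         if v is not None:
--             arr[r["elapsed_s"]] = v
--     out = []
--     last = None
--     for v in arr:
--         if v is not None:
--             last = v
--         out.append(last)
--     return out
--
--
-- def _compute_power_bests(records):
--     filled = _filled_power_1hz(records)
--     if sum(1 for v in filled if v is not None and v > 0) < 10:
--         return {k: None for k in _MMP_DURATIONS}
--     P = [0]
--     for v in filled:
--         P.append(P[-1] + (0 if v is None else v))
--     n = len(filled)
--     bests = {}
--     for col, w in _MMP_DURATIONS.items():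
--         if n < w:
--             bests[col] = None
--         else:
--             bests[col] = int(round(max(P[i + w] - P[i] for i in range(n - w + 1)) / w))
--     return bests
-- ===== Notes on version B (the rewrite author's own statement) =====
-- stated objective: alternative
-- what changed: The per-duration window scan no longer rebuilds the zero-filled list and maintains a rolling sum with a best-update branch; instead one cumulative prefix-sum table is built once and every duration's best is max of window differences P[i+w]-P[i] of that shared table.
import Mathlib
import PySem

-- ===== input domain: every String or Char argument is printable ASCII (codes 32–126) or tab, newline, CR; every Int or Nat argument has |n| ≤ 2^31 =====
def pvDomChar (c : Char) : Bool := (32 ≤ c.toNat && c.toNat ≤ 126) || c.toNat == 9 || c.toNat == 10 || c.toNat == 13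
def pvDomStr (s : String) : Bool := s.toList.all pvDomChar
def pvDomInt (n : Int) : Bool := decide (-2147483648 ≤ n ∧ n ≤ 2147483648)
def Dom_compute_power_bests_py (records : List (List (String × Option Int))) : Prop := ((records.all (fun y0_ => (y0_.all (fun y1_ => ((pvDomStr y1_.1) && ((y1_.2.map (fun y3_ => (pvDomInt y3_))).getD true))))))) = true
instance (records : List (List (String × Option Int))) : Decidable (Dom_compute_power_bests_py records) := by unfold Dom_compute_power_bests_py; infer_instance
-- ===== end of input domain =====

-- B replaces A's per-duration rolling-sum scan by one shared prefix-sum table whose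
-- window differences give each duration's best; build step and guard are unchanged.


-- shared context of both Pythons: the module constant _MMP_DURATIONS, Python's r.get(k)
-- (none for a missing key or a stored None), and int(round(best / w)).
def pvMMP : List (String × Int) :=
  [("best_5s", 5), ("best_30s", 30), ("best_1min", 60), ("best_5min", 300),
   ("best_10min", 600), ("best_20min", 1200), ("best_30min", 1800), ("best_60min", 3600)]

def pvGet (r : List (String × Option Int)) (k : String) : Option Int :=
  (PySem.Dict.get? (PySem.Dict.mk r) k).join

-- int(round(best / w)) for 0 < w, as exact half-to-even rounding of the rational best/w.
-- Exact for the calls both Pythons make on Dom: |best| ≤ 3600·2^31 < 2^53, so the double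
-- best/w is within 2^-21 of the rational while any non-tie is ≥ 1/(2w) > 2^-13 from a
-- half-integer, and exact ties are exactly representable doubles.
def pvRound (best w : Int) : Int :=
  let q := PySem.Int.floordiv best w
  let r := best - q * w
  if 2 * r < w then q
  else if w < 2 * r then q + 1
  else if PySem.Int.mod q 2 = 0 then q else q + 1

-- ===== PORT A =====
def pvBuild1hz (records : List (List (String × Option Int))) (field : String) : List (Option Int) :=
  if records.isEmpty then []
  else
    let maxT : Int := (pvGet (records.getLastD []) "elapsed_s").getD 0  -- .getD 0 is a raise path, excluded by Pre_
    let arr0 : List (Option Int) := List.replicate (maxT + 1).toNat none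
    let arr := records.foldl (fun arr r =>
      match pvGet r field with
      | some v => PySem.List.pySetD arr ((pvGet r "elapsed_s").getD 0) (some v)
      | none => arr) arr0
    (arr.foldl (fun (st : Option Int × List (Option Int)) v =>
      let last := if v.isSome then v else st.1
      (last, st.2 ++ [last])) (none, [])).2

def pvBestWindow (p1hz : List (Option Int)) (ws : Int) : Option Int :=
  if (p1hz.length : Int) < ws then none
  else
    let p := p1hz.map (fun v => v.getD 0)
    let w0 := (PySem.List.slice p none (some ws)).sum
    let res := (PySem.List.pyRange ws (p1hz.length : Int) 1).foldl
      (fun (st : Int × Int) i =>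
        let wn := st.1 + PySem.List.pyGetD p i 0 - PySem.List.pyGetD p (i - ws) 0
        (wn, if st.2 < wn then wn else st.2)) (w0, w0)
    some (pvRound res.2 ws)

def compute_power_bests_py (records : List (List (String × Option Int))) : List (String × Option Int) :=
  let p1hz := pvBuild1hz records "power"
  let valid : Int := p1hz.foldl (fun (c : Int) v =>
    match v with | some x => if 0 < x then c + 1 else c | none => c) 0
  if valid < 10 then pvMMP.map (fun kv => (kv.1, (none : Option Int)))
  else pvMMP.map (fun kv => (kv.1, pvBestWindow p1hz kv.2))

-- ===== PORT B =====
def pvFilled1hz (records : List (List (String × Option Int))) : List (Option Int) :=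
  if records.isEmpty then []
  else
    let maxT : Int := (pvGet (records.getLastD []) "elapsed_s").getD 0
    let arr0 : List (Option Int) := List.replicate (maxT + 1).toNat none
    let arr := records.foldl (fun arr r =>
      match pvGet r "power" with
      | some v => PySem.List.pySetD arr ((pvGet r "elapsed_s").getD 0) (some v)
      | none => arr) arr0
    (arr.foldl (fun (st : Option Int × List (Option Int)) v =>
      let last := if v.isSome then v else st.1
      (last, st.2 ++ [last])) (none, [])).2

def compute_power_bests_py_alt (records : List (List (String × Option Int))) : List (String × Option Int) :=
  let filled := pvFilled1hz records
  let valid : Int := filled.foldl (fun (c : Int) v =>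
    match v with | some x => if 0 < x then c + 1 else c | none => c) 0
  if valid < 10 then pvMMP.map (fun kv => (kv.1, (none : Option Int)))
  else
    let P := filled.foldl (fun acc v => acc ++ [acc.getLast! + v.getD 0]) [(0 : Int)]
    let n : Int := filled.length
    pvMMP.map (fun kv =>
      (kv.1, if n < kv.2 then none
        else some (pvRound ((PySem.List.max?
            ((PySem.List.pyRange 0 (n - kv.2 + 1) 1).map
              (fun i => PySem.List.pyGetD P (i + kv.2) 0 - PySem.List.pyGetD P i 0))
            (fun x => x)).getD 0) kv.2)))

-- ===== PRECONDITION & SPEC =====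
-- Pre_ excludes exactly the inputs on which the Python raises: a nonempty record list whose
-- last record lacks an int "elapsed_s" (KeyError/TypeError), or a record carrying power whose
-- "elapsed_s" is missing, None, or outside [-(m+1), m] (KeyError/TypeError/IndexError).
def Pre_compute_power_bests_py (records : List (List (String × Option Int))) : Prop :=
  records = [] ∨
  ((pvGet (records.getLastD []) "elapsed_s").isSome = true ∧
   ∀ r ∈ records, (pvGet r "power").isSome = true →
     ((pvGet r "elapsed_s").isSome = true ∧
      -((pvGet (records.getLastD []) "elapsed_s").getD 0 + 1) ≤ (pvGet r "elapsed_s").getD 0 ∧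
      (pvGet r "elapsed_s").getD 0 ≤ (pvGet (records.getLastD []) "elapsed_s").getD 0))
instance (records : List (List (String × Option Int))) : Decidable (Pre_compute_power_bests_py records) := by
  unfold Pre_compute_power_bests_py; infer_instance

def pvWitness_compute_power_bests_py : (List (List (String × Option Int))) :=
  [[("elapsed_s", some 0), ("power", some 5)]]

def Spec_compute_power_bests_py (records : List (List (String × Option Int))) (out : List (String × Option Int)) : Prop := out = compute_power_bests_py_alt records
instance (records : List (List (String × Option Int))) (out : List (String × Option Int)) : Decidable (Spec_compute_power_bests_py records out) := by unfold Spec_compute_power_bests_py; infer_instance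

-- ===== CLAIM (what is proved, stated in full; the proofs are below) =====
def Claim_equal_compute_power_bests_py : Prop := ∀ (records : List (List (String × Option Int))), Dom_compute_power_bests_py records → Pre_compute_power_bests_py records → Spec_compute_power_bests_py records (compute_power_bests_py records)

-- ===== LEMMAS AND PROOFS =====

-- prefix sum of the first i entries, and the window sum of length w ending at i
def pvS (q : List Int) (i : Int) : Int := (q.take i.toNat).sum
def pvT (q : List Int) (w i : Int) : Int := pvS q i - pvS q (i - w)

lemma pv_step (q : List Int) (w j : Int) (hw : 0 < w) (hwj : w ≤ j) (hj : j < (q.length : Int)) :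
    pvT q w j + PySem.List.pyGetD q j 0 - PySem.List.pyGetD q (j - w) 0 = pvT q w (j + 1) := by
  have h0j : 0 ≤ j := le_trans (le_of_lt hw) hwj
  rw [PySem.List.pyGetD_eq_getElem q 0 h0j hj, PySem.List.pyGetD_eq_getElem q 0 (by omega) (by omega)]
  unfold pvT pvS
  have e1 : (j + 1).toNat = j.toNat + 1 := by omega
  have e2 : (j + 1 - w).toNat = (j - w).toNat + 1 := by omega
  rw [e1, e2, List.sum_take_succ _ _ (by omega), List.sum_take_succ _ _ (by omega)]
  ring

lemma pv_loopA (q : List Int) (w : Int) (hw : 0 < w) :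
    ∀ (m : ℕ) (j b : Int), w ≤ j → j + (m : Int) = (q.length : Int) →
    (PySem.List.pyRange j (q.length : Int) 1).foldl
      (fun (st : Int × Int) i =>
        (st.1 + PySem.List.pyGetD q i 0 - PySem.List.pyGetD q (i - w) 0,
         if st.2 < st.1 + PySem.List.pyGetD q i 0 - PySem.List.pyGetD q (i - w) 0
         then st.1 + PySem.List.pyGetD q i 0 - PySem.List.pyGetD q (i - w) 0
         else st.2)) (pvT q w j, b)
    = (pvT q w (q.length : Int),
       ((PySem.List.pyRange (j + 1) ((q.length : Int) + 1) 1).map (pvT q w)).foldl max b) := by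
  intro m
  induction m with
  | zero =>
    intro j b hwj hlen
    rw [PySem.List.pyRange_one_eq_nil (by omega), PySem.List.pyRange_one_eq_nil (by omega)]
    rw [show j = (q.length : Int) by omega]
    simp
  | succ m ih =>
    intro j b hwj hlen
    have hstep : pvT q w j + PySem.List.pyGetD q j 0 - PySem.List.pyGetD q (j - w) 0
        = pvT q w (j + 1) := pv_step q w j hw hwj (by omega)
    rw [PySem.List.pyRange_one_cons (a := j) (b := (q.length : Int)) (by omega)]
    rw [PySem.List.pyRange_one_cons (a := j + 1) (b := (q.length : Int) + 1) (by omega)]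
    simp only [List.foldl_cons, List.map_cons]
    simp only [hstep]
    rw [ih (j + 1) (if b < pvT q w (j + 1) then pvT q w (j + 1) else b) (by omega) (by omega)]
    congr 2
    omega

lemma pv_pyRange_shift (a b c : Int) :
    PySem.List.pyRange (a + c) (b + c) 1 = (PySem.List.pyRange a b 1).map (· + c) := by
  rw [PySem.List.pyRange_one, PySem.List.pyRange_one, List.map_map]
  rw [show b + c - (a + c) = b - a by ring]
  apply List.map_congr_left
  intro k _
  simp only [Function.comp_apply]
  ring

lemma pv_getLast!_append (l : List Int) (c : Int) : (l ++ [c]).getLast! = c := by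
  cases l with
  | nil => rfl
  | cons a as => show ((a :: as) ++ [c]).getLast! = c; simp [List.getLast!]

lemma pv_Pbuild : ∀ (q pre : List Int) (c : Int),
    q.foldl (fun acc x => acc ++ [acc.getLast! + x]) (pre ++ [c]) =
    (pre ++ [c]) ++ (List.range q.length).map (fun k => c + (q.take (k + 1)).sum) := by
  intro q
  induction q with
  | nil => simp
  | cons x q ih =>
    intro pre c
    simp only [List.foldl_cons, pv_getLast!_append]
    rw [ih (pre ++ [c]) (c + x), List.append_assoc]
    congr 1
    rw [List.length_cons, List.range_succ_eq_map]
    simp only [List.map_cons, List.map_map, List.take_succ_cons, List.sum_cons,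
      List.take_zero, List.sum_nil, add_zero, List.singleton_append]
    congr 1
    apply List.map_congr_left
    intro k _
    simp only [Function.comp_apply]
    ring

lemma pv_P_getD (q : List Int) (i : Int) (h0 : 0 ≤ i) (h1 : i ≤ (q.length : Int)) :
    PySem.List.pyGetD (q.foldl (fun acc x => acc ++ [acc.getLast! + x]) [(0 : Int)]) i 0 = pvS q i := by
  have hb := pv_Pbuild q [] 0
  simp only [List.nil_append] at hb
  rw [hb]
  rw [PySem.List.pyGetD_eq_getElem _ 0 h0 (by simp [List.length_range]; omega)]
  simp only [List.singleton_append, List.getElem_cons]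
  by_cases hz : i.toNat = 0
  · rw [dif_pos hz]
    simp [pvS, hz]
  · rw [dif_neg hz, List.getElem_map, List.getElem_range]
    rw [show i.toNat - 1 + 1 = i.toNat from by omega]
    simp [pvS]

lemma pv_core (q : List Int) (w : Int) (hw : 0 < w) (hwn : w ≤ (q.length : Int)) :
    ((PySem.List.pyRange w (q.length : Int) 1).foldl
      (fun (st : Int × Int) i =>
        let wn := st.1 + PySem.List.pyGetD q i 0 - PySem.List.pyGetD q (i - w) 0
        (wn, if st.2 < wn then wn else st.2))
      ((PySem.List.slice q none (some w)).sum, (PySem.List.slice q none (some w)).sum)).2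
    = (PySem.List.max? ((PySem.List.pyRange 0 ((q.length : Int) - w + 1) 1).map
        (fun i => PySem.List.pyGetD (q.foldl (fun acc x => acc ++ [acc.getLast! + x]) [(0 : Int)]) (i + w) 0
                - PySem.List.pyGetD (q.foldl (fun acc x => acc ++ [acc.getLast! + x]) [(0 : Int)]) i 0))
        (fun x => x)).getD 0 := by
  have hfun : (fun (st : Int × Int) i =>
        let wn := st.1 + PySem.List.pyGetD q i 0 - PySem.List.pyGetD q (i - w) 0
        (wn, if st.2 < wn then wn else st.2))
      = (fun (st : Int × Int) i =>
        (st.1 + PySem.List.pyGetD q i 0 - PySem.List.pyGetD q (i - w) 0,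
         if st.2 < st.1 + PySem.List.pyGetD q i 0 - PySem.List.pyGetD q (i - w) 0
         then st.1 + PySem.List.pyGetD q i 0 - PySem.List.pyGetD q (i - w) 0
         else st.2)) := rfl
  have hw0 : (PySem.List.slice q none (some w)).sum = pvT q w w := by
    rw [PySem.List.slice_to q (show (0:Int) ≤ w by omega)]
    unfold pvT pvS
    rw [show w - w = 0 by ring]
    simp
  -- B's sums list is pvT over the window-end range
  have hsums : (PySem.List.pyRange 0 ((q.length : Int) - w + 1) 1).map
        (fun i => PySem.List.pyGetD (q.foldl (fun acc x => acc ++ [acc.getLast! + x]) [(0 : Int)]) (i + w) 0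
                - PySem.List.pyGetD (q.foldl (fun acc x => acc ++ [acc.getLast! + x]) [(0 : Int)]) i 0)
      = (PySem.List.pyRange w ((q.length : Int) + 1) 1).map (pvT q w) := by
    have hsh := pv_pyRange_shift 0 ((q.length : Int) - w + 1) w
    rw [zero_add, show (q.length : Int) - w + 1 + w = (q.length : Int) + 1 by ring] at hsh
    rw [hsh, List.map_map]
    apply List.map_congr_left
    intro i hi
    rw [PySem.List.mem_pyRange_one] at hi
    simp only [Function.comp_apply]
    rw [pv_P_getD q (i + w) (by omega) (by omega), pv_P_getD q i (by omega) (by omega)]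
    unfold pvT
    rw [show i + w - w = i by ring]
  rw [hfun, hw0, hsums]
  rw [pv_loopA q w hw ((q.length : Int) - w).toNat w (pvT q w w) (le_refl w) (by omega)]
  rw [PySem.List.pyRange_one_cons (a := w) (b := (q.length : Int) + 1) (by omega)]
  rw [List.map_cons, PySem.List.max?_id_cons]
  rfl

lemma pv_window (fl : List (Option Int)) (w : Int) (hw : 0 < w) :
    pvBestWindow fl w =
    (if ((fl.length : Int)) < w then none
     else some (pvRound ((PySem.List.max?
        ((PySem.List.pyRange 0 ((fl.length : Int) - w + 1) 1).map
          (fun i => PySem.List.pyGetD (fl.foldl (fun acc v => acc ++ [acc.getLast! + v.getD 0]) [(0 : Int)]) (i + w) 0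
                  - PySem.List.pyGetD (fl.foldl (fun acc v => acc ++ [acc.getLast! + v.getD 0]) [(0 : Int)]) i 0))
        (fun x => x)).getD 0) w)) := by
  by_cases hlt : ((fl.length : Int)) < w
  · simp only [pvBestWindow, if_pos hlt]
  · simp only [pvBestWindow, if_neg hlt]
    have hP : (fl.foldl (fun acc v => acc ++ [acc.getLast! + v.getD 0]) [(0 : Int)])
        = ((fl.map (fun v => v.getD 0)).foldl (fun acc x => acc ++ [acc.getLast! + x]) [(0 : Int)]) := by
      rw [List.foldl_map]
    rw [hP]
    have hlen : ((fl.length : Int)) = (((fl.map (fun v => v.getD 0)).length : Int)) := by simp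
    rw [hlen]
    rw [pv_core (fl.map (fun v => v.getD 0)) w hw (by simp; omega)]

-- ===== VERDICT (by name: the statement is the Claim_ definition above) =====
theorem compute_power_bests_py_spec : Claim_equal_compute_power_bests_py := by
  intro records _hdom _hpre
  unfold Spec_compute_power_bests_py compute_power_bests_py compute_power_bests_py_alt
  have hfill : pvFilled1hz records = pvBuild1hz records "power" := rfl
  rw [hfill]
  generalize pvBuild1hz records "power" = fl
  by_cases hv : (fl.foldl (fun (c : Int) v =>
      match v with | some x => if 0 < x then c + 1 else c | none => c) 0) < 10
  · simp only [hv, if_true]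
  · simp only [hv, if_false]
    apply List.map_congr_left
    intro kv hkv
    have hw : 0 < kv.2 := by
      fin_cases hkv <;> norm_num
    rw [pv_window fl kv.2 hw]
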